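-- pv_equiv track=rewrite | github.com/tlmon/Service_Media_Company | keyworder.py | keywords_sum
-- ===== SOURCE A (Python) =====
-- def keywords_sum(documents):
--     res = {}
--     for document in documents:
--         for key in document:
--             if key not in res:
--                 res[key] = document[key].copy()
--             else:
--                 res[key]["count"] += document[key]["count"]
--     return res
-- ===== SOURCE B (Python) =====
-- def keywords_sum(documents):
--     # Build a grouping index first (key -> list of its value-dicts, first-encounter order),
--     # then reduce each group: copy of the first occurrence, add the counts of the rest.
--     groups = {}
--     for document in documents:
--         for key, value in document.items():
--             groups.setdefault(key, []).append(value)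
--     res = {}
--     for key, vals in groups.items():
--         merged = vals[0].copy()
--         for v in vals[1:]:
--             merged["count"] += v["count"]
--         res[key] = merged
--     return res
-- ===== Notes on version B (the rewrite author's own statement) =====
-- stated objective: alternative
-- what changed: Replaces A's single fused scan-and-accumulate over a result dict with a two-phase build-table-then-reduce structure: one pass groups all value-dicts per key in first-encounter order, a second differently-shaped pass folds each group into a merged dict starting from a copy of the first occurrence.
import Mathlib
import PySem

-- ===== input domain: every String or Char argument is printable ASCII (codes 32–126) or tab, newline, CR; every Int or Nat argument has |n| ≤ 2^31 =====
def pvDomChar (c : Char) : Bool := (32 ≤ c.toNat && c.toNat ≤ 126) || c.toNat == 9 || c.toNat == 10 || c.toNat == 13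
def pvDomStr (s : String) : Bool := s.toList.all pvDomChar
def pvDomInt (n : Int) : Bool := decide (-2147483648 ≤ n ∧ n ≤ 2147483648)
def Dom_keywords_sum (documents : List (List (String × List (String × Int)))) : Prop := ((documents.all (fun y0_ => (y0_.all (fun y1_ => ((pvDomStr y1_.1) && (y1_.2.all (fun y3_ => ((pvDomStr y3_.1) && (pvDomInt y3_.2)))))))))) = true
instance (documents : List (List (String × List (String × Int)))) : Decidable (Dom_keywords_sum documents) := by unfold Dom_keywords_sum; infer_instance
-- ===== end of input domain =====

-- B replaces A's fused scan-and-accumulate with a group-then-reduce two-phase pass (alternative decomposition, same cost).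

-- ===== PORT A =====
-- A's accumulator step: 'if key not in res: res[key] = document[key].copy() else: res[key]["count"] += document[key]["count"]'.
-- Value dicts are PySem.Dict built by ofList; 'getD "count" 0' totalizes the KeyError branch, which Pre_ excludes.
def pvStepA (res : PySem.Dict String (PySem.Dict String Int)) (kv : String × List (String × Int)) : PySem.Dict String (PySem.Dict String Int) :=
  match res.get? kv.1 with
  | none   => res.insert kv.1 (PySem.Dict.ofList kv.2)
  | some v => res.insert kv.1 (v.insert "count" (v.getD "count" 0 + (PySem.Dict.ofList kv.2).getD "count" 0))

def keywords_sum (documents : List (List (String × List (String × Int)))) : List (String × List (String × Int)) :=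
  (documents.foldl (fun res document =>
      (PySem.Dict.ofList document).items.foldl pvStepA res)
    PySem.Dict.empty).items.map (fun p => (p.1, p.2.items))

-- ===== PORT B =====
-- merged["count"] += v["count"] (Pre_ guarantees "count" is present wherever Python reaches this line)
def pvInc (m v : PySem.Dict String Int) : PySem.Dict String Int :=
  m.insert "count" (m.getD "count" 0 + v.getD "count" 0)

-- phase 1 step: groups.setdefault(key, []).append(value)
def pvStepG (g : PySem.Dict String (List (PySem.Dict String Int))) (kv : String × List (String × Int)) : PySem.Dict String (List (PySem.Dict String Int)) :=
  g.modify kv.1 [] (fun vs => vs ++ [PySem.Dict.ofList kv.2])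

-- phase 2 step: res[key] = fold of vals[1:] into vals[0].copy()
def pvStep2 (res : PySem.Dict String (PySem.Dict String Int)) (p : String × List (PySem.Dict String Int)) : PySem.Dict String (PySem.Dict String Int) :=
  match p.2 with
  | [] => res
  | v0 :: rest => res.insert p.1 (rest.foldl pvInc v0)

def keywords_sum_alt (documents : List (List (String × List (String × Int)))) : List (String × List (String × Int)) :=
  let groups : PySem.Dict String (List (PySem.Dict String Int)) :=
    documents.foldl (fun g document => (PySem.Dict.ofList document).items.foldl pvStepG g)
      PySem.Dict.empty
  (groups.items.foldl pvStep2 PySem.Dict.empty).items.map (fun p => (p.1, p.2.items))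

-- ===== PRECONDITION & SPEC =====
-- Pre_ excludes exactly the inputs where Python A raises KeyError: some key occurring at least twice
-- (across the documents read as dicts) has an occurrence whose value dict lacks the "count" key.
def Pre_keywords_sum (documents : List (List (String × List (String × Int)))) : Prop :=
  let flat := (documents.map (fun d => (PySem.Dict.ofList d).items)).flatten
  ∀ p ∈ flat, 2 ≤ flat.countP (fun q => q.1 == p.1) → (PySem.Dict.ofList p.2).contains "count" = true
instance (documents : List (List (String × List (String × Int)))) : Decidable (Pre_keywords_sum documents) := by unfold Pre_keywords_sum; infer_instance

def pvWitness_keywords_sum : (List (List (String × List (String × Int)))) :=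
  [[("a", [("count", 2), ("x", 1)]), ("b", [("y", 5)])], [("a", [("count", 3)])]]

def Spec_keywords_sum (documents : List (List (String × List (String × Int)))) (out : List (String × List (String × Int))) : Prop := out = keywords_sum_alt documents
instance (documents : List (List (String × List (String × Int)))) (out : List (String × List (String × Int))) : Decidable (Spec_keywords_sum documents out) := by unfold Spec_keywords_sum; infer_instance

-- ===== CLAIM (what is proved, stated in full; the proofs are below) =====
def Claim_equal_keywords_sum : Prop := ∀ (documents : List (List (String × List (String × Int)))), Dom_keywords_sum documents → Pre_keywords_sum documents → Spec_keywords_sum documents (keywords_sum documents)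

-- ===== LEMMAS AND PROOFS =====

-- the merge of one group: vals[0] with the counts of vals[1:] added (empty is unreachable)
def pvReduce (vals : List (PySem.Dict String Int)) : PySem.Dict String Int :=
  match vals with
  | [] => PySem.Dict.empty
  | v0 :: rest => rest.foldl pvInc v0

-- the documents flattened to one sequence of (key, raw value) occurrences
def pvFlat (documents : List (List (String × List (String × Int)))) : List (String × List (String × Int)) :=
  (documents.map (fun d => (PySem.Dict.ofList d).items)).flatten

-- all value-dicts of key k, in occurrence order
def pvOcc (flat : List (String × List (String × Int))) (k : String) : List (PySem.Dict String Int) :=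
  (flat.filter (fun q => q.1 == k)).map (fun q => PySem.Dict.ofList q.2)

-- the canonical merged dict both programs compute
def pvCanon (flat : List (String × List (String × Int))) : PySem.Dict String (PySem.Dict String Int) :=
  PySem.Dict.mk ((PySem.Set.ofList (flat.map (fun q => q.1))).map (fun k => (k, pvReduce (pvOcc flat k))))

lemma pvCanon_keys (flat : List (String × List (String × Int))) :
    (pvCanon flat).keys = PySem.Set.ofList (flat.map (fun q => q.1)) := by
  simp [pvCanon, PySem.Dict.keys, Function.comp_def]

lemma pvCanon_nodup (flat : List (String × List (String × Int))) :
    (pvCanon flat).keys.Nodup := by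
  rw [pvCanon_keys]; exact PySem.Set.nodup_ofList _

lemma pvOcc_append_self (xs : List (String × List (String × Int))) (kv : String × List (String × Int)) :
    pvOcc (xs ++ [kv]) kv.1 = pvOcc xs kv.1 ++ [PySem.Dict.ofList kv.2] := by
  simp [pvOcc, List.filter_append]

lemma pvOcc_append_ne (xs : List (String × List (String × Int))) (kv : String × List (String × Int))
    (k : String) (h : k ≠ kv.1) : pvOcc (xs ++ [kv]) k = pvOcc xs k := by
  simp [pvOcc, List.filter_append, Ne.symm h]

lemma pvOcc_ne_nil (xs : List (String × List (String × Int))) (k : String)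
    (h : k ∈ xs.map (fun q => q.1)) : pvOcc xs k ≠ [] := by
  rcases List.mem_map.mp h with ⟨q, hq, rfl⟩
  simp only [pvOcc, ne_eq, List.map_eq_nil_iff, List.filter_eq_nil_iff]
  intro hall; exact (hall q hq) (by simp)

lemma pvOcc_eq_nil (xs : List (String × List (String × Int))) (k : String)
    (h : k ∉ xs.map (fun q => q.1)) : pvOcc xs k = [] := by
  simp only [pvOcc, List.map_eq_nil_iff, List.filter_eq_nil_iff]
  intro q hq hk
  exact h (List.mem_map.mpr ⟨q, hq, by simpa using hk⟩)

lemma pvReduce_append (vals : List (PySem.Dict String Int)) (w : PySem.Dict String Int)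
    (h : vals ≠ []) : pvReduce (vals ++ [w]) = pvInc (pvReduce vals) w := by
  cases vals with
  | nil => exact absurd rfl h
  | cons v0 r => simp [pvReduce, List.foldl_append, pvInc]

lemma pvCanon_get?_of_mem (xs : List (String × List (String × Int))) (k : String)
    (h : k ∈ xs.map (fun q => q.1)) :
    (pvCanon xs).get? k = some (pvReduce (pvOcc xs k)) := by
  apply PySem.Dict.get?_of_mem_items _ _ (pvCanon_nodup xs)
  show (k, pvReduce (pvOcc xs k)) ∈ (pvCanon xs).items
  simp only [pvCanon]
  exact List.mem_map.mpr ⟨k, (PySem.Set.mem_ofList _ _).mpr h, rfl⟩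

lemma pvCanon_get?_of_not_mem (xs : List (String × List (String × Int))) (k : String)
    (h : k ∉ xs.map (fun q => q.1)) : (pvCanon xs).get? k = none := by
  rw [PySem.Dict.get?_eq_none_iff_not_mem_keys, pvCanon_keys]
  rw [PySem.Set.mem_ofList]; exact h

-- A's fused fold computes the canonical dict
lemma pvFoldA_canon (flat : List (String × List (String × Int))) :
    flat.foldl pvStepA PySem.Dict.empty = pvCanon flat := by
  induction flat using List.reverseRecOn with
  | nil => rfl
  | append_singleton xs kv ih =>
    rw [List.foldl_append, List.foldl_cons, List.foldl_nil, ih]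
    by_cases hmem : kv.1 ∈ xs.map (fun q => q.1)
    · rw [pvStepA]
      rw [pvCanon_get?_of_mem xs kv.1 hmem]
      apply PySem.Dict.ext
      rw [PySem.Dict.items_insert_of_contains _ _ (by
        rw [PySem.Dict.contains_eq_decide_mem_keys, pvCanon_keys, decide_eq_true_eq,
          PySem.Set.mem_ofList]; exact hmem)]
      show _ = (pvCanon (xs ++ [kv])).items
      simp only [pvCanon, List.map_append, List.map_cons, List.map_nil, PySem.Set.ofList_append,
        PySem.Set.update_cons, PySem.Set.update_nil]
      rw [PySem.Set.add_of_mem (by rw [PySem.Set.mem_ofList]; exact hmem)]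
      rw [List.map_map]
      apply List.map_congr_left
      intro k hk
      by_cases hkk : k = kv.1
      · subst hkk
        simp only [Function.comp, beq_self_eq_true, if_true]
        rw [pvOcc_append_self, pvReduce_append _ _ (pvOcc_ne_nil xs kv.1 hmem)]
        rfl
      · simp only [Function.comp]
        rw [if_neg (by simpa using hkk), pvOcc_append_ne xs kv k hkk]
    · rw [pvStepA]
      rw [pvCanon_get?_of_not_mem xs kv.1 hmem]
      apply PySem.Dict.ext
      rw [PySem.Dict.items_insert_of_not_contains _ _ (by
        rw [PySem.Dict.contains_eq_decide_mem_keys, pvCanon_keys, decide_eq_false_iff_not,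
          PySem.Set.mem_ofList]; exact hmem)]
      show _ = (pvCanon (xs ++ [kv])).items
      simp only [pvCanon, List.map_append, List.map_cons, List.map_nil, PySem.Set.ofList_append,
        PySem.Set.update_cons, PySem.Set.update_nil]
      rw [PySem.Set.add_of_not_mem (by rw [PySem.Set.mem_ofList]; exact hmem)]
      rw [List.map_append]
      congr 1
      · apply List.map_congr_left
        intro k hk
        rw [pvOcc_append_ne xs kv k (by rintro rfl; exact hmem ((PySem.Set.mem_ofList _ _).mp hk))]
      · rw [List.map_cons, List.map_nil]
        rw [pvOcc_append_self, pvOcc_eq_nil xs kv.1 hmem]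
        rfl

-- B's grouping fold: its items are exactly (key, occurrences of key)
lemma pvGroups_items (flat : List (String × List (String × Int))) :
    (flat.foldl pvStepG PySem.Dict.empty).items =
      (PySem.Set.ofList (flat.map (fun q => q.1))).map (fun k => (k, pvOcc flat k)) := by
  have hk : (flat.foldl pvStepG PySem.Dict.empty).keys
      = PySem.Set.ofList (flat.map (fun q => q.1)) := by
    unfold pvStepG
    rw [PySem.Dict.keys_foldl_modify_key flat (fun kv => kv.1) []
      (fun _ kv vs => vs ++ [PySem.Dict.ofList kv.2]) PySem.Dict.empty]
    simp [PySem.Dict.keys_empty, PySem.Set.update_nil_left]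
  have hnd : (flat.foldl pvStepG PySem.Dict.empty).keys.Nodup := by
    rw [hk]; exact PySem.Set.nodup_ofList _
  rw [PySem.Dict.items_eq_map_keys _ hnd [], hk]
  apply List.map_congr_left
  intro k hk'
  have : (flat.foldl pvStepG PySem.Dict.empty).getD k [] = pvOcc flat k := by
    unfold pvStepG
    have hmap := PySem.Dict.getD_foldl_modify_append
      (flat.map (fun kv => (kv.1, PySem.Dict.ofList kv.2)))
      (PySem.Dict.empty : PySem.Dict String (List (PySem.Dict String Int))) k
    rw [List.foldl_map] at hmap
    simpa [pvOcc, List.filter_map, Function.comp] using hmap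
  rw [this]

-- phase 2 over the grouped items rebuilds the canonical dict
lemma pvPhase2_canon (flat : List (String × List (String × Int))) :
    (((PySem.Set.ofList (flat.map (fun q => q.1))).map (fun k => (k, pvOcc flat k))).foldl
        pvStep2 (PySem.Dict.empty : PySem.Dict String (PySem.Dict String Int))) = pvCanon flat := by
  rw [PySem.List.foldl_congr_mem _ _
      (fun res p => res.insert p.1 (pvReduce p.2)) _ ?_]
  · apply PySem.Dict.ext
    rw [List.foldl_map]
    rw [PySem.Dict.items_foldl_insert_fresh _ (fun k => k) (fun k => pvReduce (pvOcc flat k)) _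
      (fun a _ => PySem.Dict.contains_empty a) (by simp [PySem.Set.nodup_ofList])]
    simp [pvCanon, PySem.Dict.empty]
  · intro acc p hp
    rcases List.mem_map.mp hp with ⟨k, hkmem, rfl⟩
    have hne : pvOcc flat k ≠ [] :=
      pvOcc_ne_nil flat k ((PySem.Set.mem_ofList _ _).mp hkmem)
    cases h : pvOcc flat k with
    | nil => exact absurd h hne
    | cons v0 rest => simp [pvStep2, pvReduce]

-- a fold over all documents' items is a fold over the flattened occurrence list
lemma pvFoldDocs {sigma : Type} (documents : List (List (String × List (String × Int))))
    (f : sigma → String × List (String × Int) → sigma) (init : sigma) :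
    documents.foldl (fun a d => (PySem.Dict.ofList d).items.foldl f a) init
      = (pvFlat documents).foldl f init := by
  rw [pvFlat, List.foldl_flatten, List.foldl_map]

-- ===== VERDICT (by name: the statement is the Claim_ definition above) =====
theorem keywords_sum_spec : Claim_equal_keywords_sum := by
  intro documents _ _
  unfold Spec_keywords_sum
  show (keywords_sum documents) = _
  simp only [keywords_sum, keywords_sum_alt]
  rw [pvFoldDocs documents pvStepA PySem.Dict.empty, pvFoldA_canon]
  rw [pvFoldDocs documents pvStepG PySem.Dict.empty]
  rw [pvGroups_items, pvPhase2_canon]
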